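-- pv_equiv track=rewrite | github.com/analogdevicesinc/pyadi-dt | adidt/xsa/viz/clock_graph.py | _top_level_content
-- ===== SOURCE A (Python) =====
-- def _top_level_content(content: str) -> str:
--     """Return *content* with all nested brace blocks removed.
--
--     Only top-level property lines (outside ``{ }`` sub-blocks) are kept,
--     preventing child-node clock properties from being attributed to the
--     parent node.
--
--     Args:
--         content: Raw text of a DTS node block (excluding the outer braces).
--
--     Returns:
--         A string containing only the characters at brace depth 0.
--     """
--     result: list[str] = []
--     depth = 0
--     for ch in content:
--         if ch == "{":
--             depth += 1
--         elif ch == "}":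
--             depth -= 1
--         elif depth == 0:
--             result.append(ch)
--     return "".join(result)
-- ===== SOURCE B (Python) =====
-- def _top_level_content(content: str) -> str:
--     # Two-pass prefix-sum decomposition: per-char brace deltas, inclusive
--     # running depths, then filter non-brace chars at depth 0.
--     deltas = [1 if c == "{" else -1 if c == "}" else 0 for c in content]
--     depths = []
--     s = 0
--     for d in deltas:
--         s += d
--         depths.append(s)
--     return "".join(c for c, dep in zip(content, depths)
--                    if c != "{" and c != "}" and dep == 0)
-- ===== Notes on version B (the rewrite author's own statement) =====
-- stated objective: alternative
-- what changed: Replaces the single stateful filter loop by a prefix-sum decomposition: a delta list, an inclusive running-depth list, and a zip/filter/join pass over (char, depth) pairs.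
import Mathlib
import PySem

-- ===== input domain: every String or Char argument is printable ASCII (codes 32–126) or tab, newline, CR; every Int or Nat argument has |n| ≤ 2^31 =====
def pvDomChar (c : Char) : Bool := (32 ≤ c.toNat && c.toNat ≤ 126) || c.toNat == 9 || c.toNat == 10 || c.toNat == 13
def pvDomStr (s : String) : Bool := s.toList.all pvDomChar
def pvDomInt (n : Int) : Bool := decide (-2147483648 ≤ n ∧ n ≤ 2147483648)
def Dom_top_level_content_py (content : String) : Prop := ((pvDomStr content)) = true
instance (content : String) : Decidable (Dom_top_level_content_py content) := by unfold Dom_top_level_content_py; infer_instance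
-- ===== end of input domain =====

-- B replaces the stateful depth loop by a prefix-sum decomposition (delta list, running depths, zip-filter); objective: alternative, same cost.
-- ===== PORT A =====
def top_level_content_py (content : String) : String :=
  let st := content.toList.foldl (fun (st : List Char × Int) ch =>
    if ch = '{' then (st.1, st.2 + 1)
    else if ch = '}' then (st.1, st.2 - 1)
    else if st.2 = 0 then (st.1 ++ [ch], st.2)
    else st) ([], 0)
  String.mk st.1

-- ===== PORT B =====
def pvDelta (ch : Char) : Int := if ch = '{' then 1 else if ch = '}' then -1 else 0

def pvAccum (s : Int) : List Int → List Int
  | [] => []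
  | d :: ds => (s + d) :: pvAccum (s + d) ds

def top_level_content_py_alt (content : String) : String :=
  let cs := content.toList
  let depths := pvAccum 0 (cs.map pvDelta)
  String.mk (((cs.zip depths).filter (fun p => p.1 ≠ '{' ∧ p.1 ≠ '}' ∧ p.2 = 0)).map Prod.fst)

-- ===== PRECONDITION & SPEC =====
def Spec_top_level_content_py (content : String) (out : String) : Prop := out = top_level_content_py_alt content
instance (content : String) (out : String) : Decidable (Spec_top_level_content_py content out) := by unfold Spec_top_level_content_py; infer_instance

-- ===== CLAIM (what is proved, stated in full; the proofs are below) =====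
def Claim_equal_top_level_content_py : Prop := ∀ (content : String), Dom_top_level_content_py content → Spec_top_level_content_py content (top_level_content_py content)

-- ===== LEMMAS AND PROOFS =====

-- ===== VERDICT (by name: the statement is the Claim_ definition above) =====
lemma pv_main (cs : List Char) (acc : List Char) (d : Int) :
    (cs.foldl (fun (st : List Char × Int) ch =>
      if ch = '{' then (st.1, st.2 + 1)
      else if ch = '}' then (st.1, st.2 - 1)
      else if st.2 = 0 then (st.1 ++ [ch], st.2)
      else st) (acc, d)).1
    = acc ++ (((cs.zip (pvAccum d (cs.map pvDelta))).filter
        (fun p => p.1 ≠ '{' ∧ p.1 ≠ '}' ∧ p.2 = 0)).map Prod.fst) := by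
  induction cs generalizing acc d with
  | nil => simp
  | cons ch cs ih =>
    by_cases h1 : ch = '{'
    · subst h1
      have e : pvDelta '{' = 1 := by decide
      simp only [List.foldl_cons, List.map_cons, pvAccum, List.zip_cons_cons,
        List.filter_cons, e]
      simp only [if_true]
      rw [if_neg (by simp)]
      exact ih acc (d + 1)
    · by_cases h2 : ch = '}'
      · subst h2
        have e : pvDelta '}' = -1 := by decide
        simp only [List.foldl_cons, List.map_cons, pvAccum, List.zip_cons_cons,
          List.filter_cons, e]
        simp only [if_true, if_false]
        rw [if_neg (by simp)]
        have hd : d + (-1) = d - 1 := by ring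
        rw [hd]
        exact ih acc (d - 1)
      · have e : pvDelta ch = 0 := by simp [pvDelta, h1, h2]
        simp only [List.foldl_cons, List.map_cons, pvAccum, List.zip_cons_cons,
          List.filter_cons, e, add_zero, if_neg h1, if_neg h2]
        by_cases hd : d = 0
        · subst hd
          rw [if_pos rfl, if_pos (by simp [h1, h2])]
          rw [ih (acc ++ [ch]) 0]
          simp
        · rw [if_neg hd, if_neg (by simp [hd])]
          exact ih acc d

theorem top_level_content_py_spec : Claim_equal_top_level_content_py := by
  intro content _
  unfold Spec_top_level_content_py top_level_content_py top_level_content_py_alt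
  simp only []
  rw [pv_main]
  simp
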